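-- pv_equiv track=rewrite | github.com/krzyssikora/advent_of_code | aoc_2021/23_2_amphipods.py | go_home
-- ===== SOURCE A (Python) =====
-- def single_move(state, i, j):
--     i, j = min(i, j), max(i, j)
--     return state[:i] + state[j] + state[i + 1:j] + state[i] + state[j + 1:]
--
-- def get_moves(hallway, room_no, room_pos):
--     # returns the number of moves between hallway and room
--     return abs(hallway - room_no) * 2 \
--            + 4 * (room_no >= hallway) \
--            - 2 * (hallway - room_no >= 2) \
--            - 1 * (hallway in {0, 6}) \
--            + room_pos
--
-- def go_home(state, cost):
--     # if there is an option to move an amphipod from the hallway to its homeroom for good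
--     # (so that it will not heve to be removed again), return such final state and its cost
--     costs = {"A": 1, "B": 10, "C": 100, "D": 1000}
--     homerooms = {"A": 0, "B": 1, "C": 2, "D": 3}
--     room_length = (len(state) - 7) // 4
--
--     for hallway_position in range(7):
--         if state[hallway_position] == ".":
--             continue
--         # first amphipod found
--         amphipod = state[hallway_position]
--         room = homerooms[amphipod]
--         # check if home is ready to be moved to
--         room_position = room_length - 1
--         while room_position > 0 and state[7 + room_length * room + room_position] == amphipod:
--             room_position -= 1
--         if state[7 + room_length * room + room_position] != ".":
--             continue  # a different type of amphipod found
--         # now room_position points to where the amphipod from hallway can be moved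
--         # we need to see if the road is free
--         # go right firstly, from the hallway to the homeroom
--         pos = hallway_position
--         while pos < room + 2 and state[pos + 1] == ".":
--             pos += 1
--         # now try left
--         while pos > room + 1 and state[pos - 1] == ".":
--             pos -= 1
--         if pos == room + 1 or pos == room + 2:
--             new_cost = get_moves(hallway_position, room, room_position) * costs[amphipod]
--             new_state = single_move(state, hallway_position, 7 + room_length * room + room_position)
--             return go_home(new_state, cost + new_cost)  # to move other amphipods from hallway to their homes
--     return state, cost
-- ===== SOURCE B (Python) =====
-- def go_home(state, cost):
--     # Iterative version: loop until a full hallway scan finds no legal move.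
--     # Home-readiness is checked by counting the room's trailing run of matching
--     # amphipods, and path-clearance by testing the hallway interval directly.
--     costs = {"A": 1, "B": 10, "C": 100, "D": 1000}
--     k = (len(state) - 7) // 4
--     while True:
--         moved = False
--         for hp in range(7):
--             c = state[hp]
--             if c == ".":
--                 continue
--             r = "ABCD".index(c)
--             base = 7 + k * r
--             room = state[base:base + k]
--             t = 0
--             while t < k and room[k - 1 - t] == c:
--                 t += 1
--             p = k - 1 - t
--             if t == k or room[p] != ".":
--                 continue
--             lo, hi = (hp + 1, r + 2) if hp <= r + 1 else (r + 2, hp)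
--             if any(state[x] != "." for x in range(lo, hi)):
--                 continue
--             steps = abs(hp - r) * 2 + 4 * (r >= hp) - 2 * (hp - r >= 2) - (hp in (0, 6)) + p
--             cost += steps * costs[c]
--             state = state[:hp] + "." + state[hp + 1:base + p] + c + state[base + p + 1:]
--             moved = True
--             break
--         if not moved:
--             return state, cost
-- ===== Notes on version B (the rewrite author's own statement) =====
-- stated objective: alternative
-- what changed: The recursive go_home is rewritten as an iterative loop that rescans the hallway until no move applies, with the room-readiness check done by counting the room slice's trailing run of matching amphipods and the path check done as a direct hallway-interval clearance test instead of A's absolute-index while-walks.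
-- intended difference: On states whose rooms have length 0 (7 <= len(state) <= 10) with hallway cell 6 free and some amphipod in cells 0..5 with a clear path, A's negative room index wraps around and 'moves' that amphipod onto hallway cell 6 adding a cost, while B leaves state and cost unchanged, the intended behaviour since a zero-length room admits no move. — e.g. on go_home("A......", 0): A returns ("......A", 2), B returns ("A......", 0)
import Mathlib
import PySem

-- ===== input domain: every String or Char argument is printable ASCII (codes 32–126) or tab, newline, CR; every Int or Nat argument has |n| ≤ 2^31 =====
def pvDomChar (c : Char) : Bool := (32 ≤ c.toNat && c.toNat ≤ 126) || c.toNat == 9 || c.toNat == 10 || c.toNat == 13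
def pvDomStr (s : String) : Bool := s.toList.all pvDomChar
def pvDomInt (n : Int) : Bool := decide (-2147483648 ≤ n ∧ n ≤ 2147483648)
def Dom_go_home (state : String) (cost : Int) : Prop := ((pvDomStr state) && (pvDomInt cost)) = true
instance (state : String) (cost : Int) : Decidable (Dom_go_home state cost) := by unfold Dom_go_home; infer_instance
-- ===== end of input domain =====

-- B rewrites the recursive hallway-rescan as an iterative scan loop with a trailing-run
-- room check and a direct hallway-interval clearance test (objective: alternative
-- decomposition, same cost). Equivalence is about return values; neither side mutates.

-- indexing helper shared by both ports: state[i] (in range on every admitted input)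
def pyAt (l : List Char) (i : Int) : Char := PySem.List.pyGetD l i '?'

-- ===== PORT A =====
def single_move (l : List Char) (i j : Int) : List Char :=
  let i' := min i j
  let j' := max i j
  PySem.List.slice l none (some i') ++ [pyAt l j'] ++
    PySem.List.slice l (some (i' + 1)) (some j') ++ [pyAt l i'] ++
    PySem.List.slice l (some (j' + 1)) none

def get_moves (hallway room_no room_pos : Int) : Int :=
  |hallway - room_no| * 2 + 4 * (if room_no ≥ hallway then 1 else 0)
    - 2 * (if hallway - room_no ≥ 2 then 1 else 0)
    - (if hallway = 0 ∨ hallway = 6 then 1 else 0) + room_pos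

-- costs / homerooms dict lookups (keys are exactly "A".."D" under Pre_)
def costsA (c : Char) : Int :=
  if c = 'A' then 1 else if c = 'B' then 10 else if c = 'C' then 100 else 1000

def homeroomsA (c : Char) : Int :=
  if c = 'A' then 0 else if c = 'B' then 1 else if c = 'C' then 2 else 3

-- while room_position > 0 and state[7 + room_length*room + room_position] == amphipod
-- (structural fuel rp.toNat is exact: at fuel 0, rp ≤ 0 and the guard is false anyway)
def room_scan_aux (l : List Char) (base : Int) (c : Char) : Nat → Int → Int
  | 0, rp => rp
  | Nat.succ n, rp => if 0 < rp ∧ pyAt l (base + rp) = c then room_scan_aux l base c n (rp - 1) else rp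

def room_scan (l : List Char) (base : Int) (c : Char) (rp : Int) : Int :=
  room_scan_aux l base c rp.toNat rp

-- while pos < room + 2 and state[pos + 1] == "."
def walk_right_aux (l : List Char) (room : Int) : Nat → Int → Int
  | 0, pos => pos
  | Nat.succ n, pos => if pos < room + 2 ∧ pyAt l (pos + 1) = '.' then walk_right_aux l room n (pos + 1) else pos

def walk_right (l : List Char) (room : Int) (pos : Int) : Int :=
  walk_right_aux l room (room + 2 - pos).toNat pos

-- while pos > room + 1 and state[pos - 1] == "."
def walk_left_aux (l : List Char) (room : Int) : Nat → Int → Int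
  | 0, pos => pos
  | Nat.succ n, pos => if room + 1 < pos ∧ pyAt l (pos - 1) = '.' then walk_left_aux l room n (pos - 1) else pos

def walk_left (l : List Char) (room : Int) (pos : Int) : Int :=
  walk_left_aux l room (pos - (room + 1)).toNat pos

-- the recursion go_home fused with its for-loop over hallway positions: each scan step
-- or restart consumes one unit of fuel; the fuel only bounds the recursion depth (on
-- admitted inputs every applied move frees a hallway cell 0..5 or fills cell 6, so far
-- fewer than 200 steps ever occur)
def stepA (F : Nat) (l : List Char) (cost : Int) (hps : List Int) : List Char × Int :=
  match F with
  | 0 => (l, cost)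
  | Nat.succ F =>
    match hps with
    | [] => (l, cost)
    | hp :: rest =>
      if pyAt l hp = '.' then stepA F l cost rest
      else
        let amphipod := pyAt l hp
        let room := homeroomsA amphipod
        let room_length := PySem.Int.floordiv ((l.length : Int) - 7) 4
        let room_position := room_scan l (7 + room_length * room) amphipod (room_length - 1)
        if pyAt l (7 + room_length * room + room_position) ≠ '.' then stepA F l cost rest
        else
          let pos := walk_left l room (walk_right l room hp)
          if pos = room + 1 ∨ pos = room + 2 then
            stepA F (single_move l hp (7 + room_length * room + room_position))
              (cost + get_moves hp room room_position * costsA amphipod)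
              (PySem.List.pyRange 0 7 1)
          else stepA F l cost rest

def go_home (state : String) (cost : Int) : String × Int :=
  let r := stepA 200 state.toList cost (PySem.List.pyRange 0 7 1)
  (String.ofList r.1, r.2)

-- ===== PORT B =====
-- number of trailing amphipods of the room already home:
-- while t < k and room[k - 1 - t] == c: t += 1
def trailing_run_aux (room : List Char) (k : Int) (c : Char) : Nat → Int → Int
  | 0, t => t
  | Nat.succ n, t => if t < k ∧ pyAt room (k - 1 - t) = c then trailing_run_aux room k c n (t + 1) else t

def trailing_run (room : List Char) (k : Int) (c : Char) (t : Int) : Int :=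
  trailing_run_aux room k c (k - t).toNat t

-- any(state[x] != "." for x in range(lo, hi))
def any_blocked (l : List Char) (lo hi : Int) : Bool :=
  (PySem.List.pyRange lo hi 1).any (fun x => pyAt l x != '.')

-- one full for-scan of the hallway: the first legal move applied, or none
def scanB (k : Int) (l : List Char) (cost : Int) (hps : List Int) : Option (List Char × Int) :=
  match hps with
  | [] => none
  | hp :: rest =>
    let c := pyAt l hp
    if c = '.' then scanB k l cost rest
    else
      let r : Int := (PySem.List.index? ['A', 'B', 'C', 'D'] c).getD 0
      let base := 7 + k * r
      let room := PySem.List.slice l (some base) (some (base + k))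
      let t := trailing_run room k c 0
      let p := k - 1 - t
      if t = k ∨ pyAt room p ≠ '.' then scanB k l cost rest
      else if any_blocked l (if hp ≤ r + 1 then hp + 1 else r + 2)
                          (if hp ≤ r + 1 then r + 2 else hp) then scanB k l cost rest
      else
        let steps := |hp - r| * 2 + 4 * (if r ≥ hp then 1 else 0)
          - 2 * (if hp - r ≥ 2 then 1 else 0) - (if hp = 0 ∨ hp = 6 then 1 else 0) + p
        let costc : Int := if c = 'A' then 1 else if c = 'B' then 10 else if c = 'C' then 100 else 1000
        some (PySem.List.slice l none (some hp) ++ ['.'] ++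
                PySem.List.slice l (some (hp + 1)) (some (base + p)) ++ [c] ++
                PySem.List.slice l (some (base + p + 1)) none,
              cost + steps * costc)

-- while True: rescan; stop at the first scan that applies no move (same fuel remark as for A)
def goB (fuel : Nat) (k : Int) (l : List Char) (cost : Int) : List Char × Int :=
  match fuel with
  | 0 => (l, cost)
  | Nat.succ f =>
    match scanB k l cost (PySem.List.pyRange 0 7 1) with
    | none => (l, cost)
    | some (l', cost') => goB f k l' cost'

def go_home_alt (state : String) (cost : Int) : String × Int :=
  let k := PySem.Int.floordiv ((state.toList.length : Int) - 7) 4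
  let r := goB 20 k state.toList cost
  (String.ofList r.1, r.2)

-- ===== PRECONDITION & SPEC =====
-- Pre_ is exactly where the Python A returns: a state shorter than 7 makes the hallway
-- scan raise IndexError, and a hallway character outside ".ABCD" is eventually scanned
-- and raises KeyError in homerooms[amphipod].
def Pre_go_home (state : String) (cost : Int) : Prop :=
  7 ≤ state.toList.length ∧ ∀ i < 7, state.toList.getD i ' ' ∈ ['.', 'A', 'B', 'C', 'D']
instance (state : String) (cost : Int) : Decidable (Pre_go_home state cost) := by
  unfold Pre_go_home; infer_instance

def pvWitness_go_home : String × Int := (".B..A......D...", 3)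

-- home-room index of an amphipod letter ('A' → 0 … 'D' → 3), written arithmetically
def roomIdxD (c : Char) : Nat := c.toNat - 65

-- On states whose rooms have length 0 (7 ≤ len ≤ 10) with hallway cell 6 free and some
-- amphipod in cells 0..5 with a clear path, A's negative room index wraps around and
-- "moves" that amphipod onto hallway cell 6 (adding a cost); B returns the state and
-- cost unchanged, the intended behaviour since a zero-length room admits no move.
def D_go_home (state : String) (cost : Int) : Prop :=
  7 ≤ state.toList.length ∧ state.toList.length ≤ 10 ∧ state.toList.getD 6 ' ' = '.' ∧
  ∃ hp < 6, state.toList.getD hp ' ' ∈ ['A', 'B', 'C', 'D'] ∧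
    (∀ x < roomIdxD (state.toList.getD hp ' ') + 2, hp + 1 ≤ x → state.toList.getD x ' ' = '.') ∧
    (∀ x < hp, roomIdxD (state.toList.getD hp ' ') + 2 ≤ x → state.toList.getD x ' ' = '.')
instance (state : String) (cost : Int) : Decidable (D_go_home state cost) := by
  unfold D_go_home; infer_instance

def Spec_go_home (state : String) (cost : Int) (out : String × Int) : Prop :=
  ¬ D_go_home state cost → out = go_home_alt state cost
instance (state : String) (cost : Int) (out : String × Int) : Decidable (Spec_go_home state cost out) := by
  unfold Spec_go_home; infer_instance

def pvDiffWitness_go_home : String × Int := ("A......", 0)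
def pvDiffWitnessOut_go_home : (String × Int) × (String × Int) := (("......A", 2), ("A......", 0))

-- ===== CLAIM (what is proved, stated in full; the proofs are below) =====
def Claim_unchanged_go_home : Prop := ∀ (state : String) (cost : Int), Dom_go_home state cost → Pre_go_home state cost → Spec_go_home state cost (go_home state cost)
def Claim_exact_go_home : Prop := ∀ (state : String) (cost : Int), Dom_go_home state cost → Pre_go_home state cost → D_go_home state cost → go_home state cost ≠ go_home_alt state cost
def Claim_changed_go_home : Prop := Dom_go_home (pvDiffWitness_go_home.1) (pvDiffWitness_go_home.2) ∧ Pre_go_home (pvDiffWitness_go_home.1) (pvDiffWitness_go_home.2) ∧ D_go_home (pvDiffWitness_go_home.1) (pvDiffWitness_go_home.2) ∧ go_home (pvDiffWitness_go_home.1) (pvDiffWitness_go_home.2) = pvDiffWitnessOut_go_home.1 ∧ go_home_alt (pvDiffWitness_go_home.1) (pvDiffWitness_go_home.2) = pvDiffWitnessOut_go_home.2 ∧ pvDiffWitnessOut_go_home.1 ≠ pvDiffWitnessOut_go_home.2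

-- ===== LEMMAS AND PROOFS =====

-- ---- proof-land definitions ----
def kOf (cs : List Char) : Int := PySem.Int.floordiv ((cs.length : Int) - 7) 4

def PreI (cs : List Char) : Prop :=
  7 ≤ (cs.length : Int) ∧ ∀ i : Int, 0 ≤ i → i < 7 → pyAt cs i ∈ (['.', 'A', 'B', 'C', 'D'] : List Char)

def Clear (cs : List Char) (lo hi : Int) : Prop := ∀ x : Int, lo ≤ x → x < hi → pyAt cs x = '.'

def NoMove (cs : List Char) : Prop :=
  pyAt cs 6 = '.' → ∀ hp : Int, 0 ≤ hp → hp < 6 → pyAt cs hp ≠ '.' →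
    ¬ Clear cs (if hp ≤ homeroomsA (pyAt cs hp) + 1 then hp + 1 else homeroomsA (pyAt cs hp) + 2)
               (if hp ≤ homeroomsA (pyAt cs hp) + 1 then homeroomsA (pyAt cs hp) + 2 else hp)

def mu (cs : List Char) : Nat := ∑ i ∈ Finset.range 7, (if pyAt cs (i : Int) = '.' then 0 else 1)

-- ---- basic facts ----
lemma kOf_facts (cs : List Char) (h : 7 ≤ (cs.length : Int)) :
    0 ≤ kOf cs ∧ 4 * kOf cs ≤ (cs.length : Int) - 7 ∧ (cs.length : Int) - 7 < 4 * kOf cs + 4 := by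
  have h1 := PySem.Int.floordiv_mul_add_mod ((cs.length : Int) - 7) 4
  have h2 := PySem.Int.mod_nonneg ((cs.length : Int) - 7) (b := 4) (by norm_num)
  have h3 := PySem.Int.mod_lt ((cs.length : Int) - 7) (b := 4) (by norm_num)
  unfold kOf
  omega

lemma pyAt_natCast (cs : List Char) (m : Nat) (h : m < cs.length) :
    pyAt cs (m : Int) = cs.getD m ' ' := by
  unfold pyAt
  rw [PySem.List.pyGetD_natCast]
  rw [List.getD_eq_getElem _ _ h, List.getD_eq_getElem _ _ h]

lemma pyAt_eq_getD (cs : List Char) (i : Int) (h0 : 0 ≤ i) (h : i < (cs.length : Int)) :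
    pyAt cs i = cs.getD i.toNat ' ' := by
  have hi : i = ((i.toNat : Nat) : Int) := by omega
  conv_lhs => rw [hi]
  rw [pyAt_natCast cs i.toNat (by omega)]

lemma char_cases (cs : List Char) (i : Int) (hpre : PreI cs) (h0 : 0 ≤ i) (h7 : i < 7)
    (hne : pyAt cs i ≠ '.') :
    pyAt cs i = 'A' ∨ pyAt cs i = 'B' ∨ pyAt cs i = 'C' ∨ pyAt cs i = 'D' := by
  have := hpre.2 i h0 h7
  simp only [List.mem_cons] at this
  tauto

lemma hr_facts (c : Char) (hc : c = 'A' ∨ c = 'B' ∨ c = 'C' ∨ c = 'D') :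
    (((PySem.List.index? ['A', 'B', 'C', 'D'] c).getD 0 : Nat) : Int) = homeroomsA c ∧
    0 ≤ homeroomsA c ∧ homeroomsA c ≤ 3 ∧ ((roomIdxD c : Nat) : Int) = homeroomsA c := by
  rcases hc with h | h | h | h <;> subst h <;> refine ⟨by decide, by decide, by decide, by decide⟩

lemma slice_pyAt (cs : List Char) (base k i : Int) (hb : 0 ≤ base) (h0 : 0 ≤ i) (hik : i < k)
    (hbk : base + k ≤ (cs.length : Int)) :
    pyAt (PySem.List.slice cs (some base) (some (base + k))) i = pyAt cs (base + i) := by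
  unfold pyAt
  rw [PySem.List.slice_toNat cs hb (by omega)]
  rw [PySem.List.pyGetD_eq_getElem _ _ h0 (by rw [List.length_take]; simp [List.length_drop]; omega),
      PySem.List.pyGetD_eq_getElem _ _ (by omega) (by omega)]
  rw [List.getElem_take, List.getElem_drop]
  congr 1
  omega

-- ---- the two room-readiness loops agree ----
lemma loops_bridge (cs room : List Char) (base k : Int) (c : Char)
    (hroom : ∀ i : Int, 0 ≤ i → i < k → pyAt room i = pyAt cs (base + i)) :
    ∀ (m : Nat) (rp : Int), rp.toNat = m → 0 ≤ rp → rp < k →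
      (trailing_run_aux room k c (m + 1) (k - 1 - rp) = k ∧
        room_scan_aux cs base c m rp = 0 ∧ pyAt cs (base + 0) = c) ∨
      (k - 1 - trailing_run_aux room k c (m + 1) (k - 1 - rp) = room_scan_aux cs base c m rp ∧
        0 ≤ room_scan_aux cs base c m rp ∧ room_scan_aux cs base c m rp ≤ rp ∧
        pyAt cs (base + room_scan_aux cs base c m rp) ≠ c) := by
  intro m
  induction m with
  | zero =>
    intro rp hm h0 hk
    have hrp : rp = 0 := by omega
    subst hrp
    have ht : trailing_run_aux room k c (0 + 1) (k - 1 - 0) =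
        if k - 1 - 0 < k ∧ pyAt room (k - 1 - (k - 1 - 0)) = c
        then trailing_run_aux room k c 0 (k - 1 - 0 + 1) else k - 1 - 0 := rfl
    have hrs : room_scan_aux cs base c 0 0 = 0 := rfl
    have harith : k - 1 - (k - 1 - 0) = 0 := by omega
    have hri : pyAt room (k - 1 - (k - 1 - 0)) = pyAt cs (base + 0) := by
      rw [harith]; exact hroom 0 le_rfl (by omega)
    by_cases hch : pyAt cs (base + 0) = c
    · left
      rw [ht, if_pos ⟨by omega, by rw [hri]; exact hch⟩]
      have : trailing_run_aux room k c 0 (k - 1 - 0 + 1) = k - 1 - 0 + 1 := rfl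
      rw [this, hrs]
      exact ⟨by omega, rfl, hch⟩
    · right
      rw [ht, if_neg (by intro hcon; exact hch (by rw [← hri]; exact hcon.2)), hrs]
      exact ⟨by omega, le_rfl, le_rfl, by simpa using hch⟩
  | succ n ih =>
    intro rp hm h0 hk
    have hrp : 0 < rp := by omega
    have ht : trailing_run_aux room k c (n + 1 + 1) (k - 1 - rp) =
        if k - 1 - rp < k ∧ pyAt room (k - 1 - (k - 1 - rp)) = c
        then trailing_run_aux room k c (n + 1) (k - 1 - rp + 1) else k - 1 - rp := rfl
    have hrs : room_scan_aux cs base c (n + 1) rp =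
        if 0 < rp ∧ pyAt cs (base + rp) = c then room_scan_aux cs base c n (rp - 1) else rp := rfl
    have harith : k - 1 - (k - 1 - rp) = rp := by omega
    have hri : pyAt room (k - 1 - (k - 1 - rp)) = pyAt cs (base + rp) := by
      rw [harith]; exact hroom rp (by omega) hk
    by_cases hch : pyAt cs (base + rp) = c
    · rw [ht, hrs, if_pos ⟨by omega, by rw [hri]; exact hch⟩, if_pos ⟨hrp, hch⟩]
      have harith2 : k - 1 - rp + 1 = k - 1 - (rp - 1) := by omega
      rw [harith2]
      rcases ih (rp - 1) (by omega) (by omega) (by omega) with h | h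
      · exact Or.inl h
      · exact Or.inr ⟨h.1, h.2.1, by omega, h.2.2.2⟩
    · rw [ht, hrs, if_neg (by intro hcon; exact hch (by rw [← hri]; exact hcon.2)),
          if_neg (by intro hcon; exact hch hcon.2)]
      exact Or.inr ⟨by omega, by omega, le_rfl, hch⟩


-- ---- hallway walk characterisations ----
lemma walk_right_spec (cs : List Char) (r : Int) :
    ∀ (m : Nat) (pos : Int), (r + 2 - pos).toNat = m → pos ≤ r + 2 →
      pos ≤ walk_right_aux cs r m pos ∧ walk_right_aux cs r m pos ≤ r + 2 ∧
      (∀ x : Int, pos < x → x ≤ walk_right_aux cs r m pos → pyAt cs x = '.') ∧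
      (walk_right_aux cs r m pos = r + 2 ∨ pyAt cs (walk_right_aux cs r m pos + 1) ≠ '.') := by
  intro m
  induction m with
  | zero =>
    intro pos hm hle
    have hpos : pos = r + 2 := by omega
    have h0 : walk_right_aux cs r 0 pos = pos := rfl
    rw [h0]
    exact ⟨le_rfl, by omega, fun x h1 h2 => absurd (lt_of_lt_of_le h1 h2) (lt_irrefl _), Or.inl hpos⟩
  | succ n ih =>
    intro pos hm hle
    have he : walk_right_aux cs r (n + 1) pos =
        if pos < r + 2 ∧ pyAt cs (pos + 1) = '.' then walk_right_aux cs r n (pos + 1) else pos := rfl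
    by_cases hc : pos < r + 2 ∧ pyAt cs (pos + 1) = '.'
    · rw [he, if_pos hc]
      obtain ⟨hq1, hq2, hq3, hq4⟩ := ih (pos + 1) (by omega) (by omega)
      refine ⟨by omega, hq2, ?_, hq4⟩
      intro x h1 h2
      by_cases hx : x = pos + 1
      · rw [hx]; exact hc.2
      · exact hq3 x (by omega) h2
    · rw [he, if_neg hc]
      refine ⟨le_rfl, hle, fun x h1 h2 => absurd (lt_of_lt_of_le h1 h2) (lt_irrefl _), ?_⟩
      rcases (not_and_or.mp hc) with h | h
      · exact Or.inl (by omega)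
      · exact Or.inr h

lemma walk_left_spec (cs : List Char) (r : Int) :
    ∀ (m : Nat) (pos : Int), (pos - (r + 1)).toNat = m → r + 1 ≤ pos →
      r + 1 ≤ walk_left_aux cs r m pos ∧ walk_left_aux cs r m pos ≤ pos ∧
      (∀ x : Int, walk_left_aux cs r m pos ≤ x → x < pos → pyAt cs x = '.') ∧
      (walk_left_aux cs r m pos = r + 1 ∨ pyAt cs (walk_left_aux cs r m pos - 1) ≠ '.') := by
  intro m
  induction m with
  | zero =>
    intro pos hm hle
    have hpos : pos = r + 1 := by omega
    have h0 : walk_left_aux cs r 0 pos = pos := rfl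
    rw [h0]
    exact ⟨by omega, le_rfl, fun x h1 h2 => absurd (lt_of_le_of_lt h1 h2) (lt_irrefl _), Or.inl hpos⟩
  | succ n ih =>
    intro pos hm hle
    have he : walk_left_aux cs r (n + 1) pos =
        if r + 1 < pos ∧ pyAt cs (pos - 1) = '.' then walk_left_aux cs r n (pos - 1) else pos := rfl
    by_cases hc : r + 1 < pos ∧ pyAt cs (pos - 1) = '.'
    · rw [he, if_pos hc]
      obtain ⟨hq1, hq2, hq3, hq4⟩ := ih (pos - 1) (by omega) (by omega)
      refine ⟨hq1, by omega, ?_, hq4⟩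
      intro x h1 h2
      by_cases hx : x = pos - 1
      · rw [hx]; exact hc.2
      · exact hq3 x h1 (by omega)
    · rw [he, if_neg hc]
      refine ⟨hle, le_rfl, fun x h1 h2 => absurd (lt_of_le_of_lt h1 h2) (lt_irrefl _), ?_⟩
      rcases (not_and_or.mp hc) with h | h
      · exact Or.inl (by omega)
      · exact Or.inr h

lemma anyb_iff (cs : List Char) (lo hi : Int) :
    any_blocked cs lo hi = false ↔ Clear cs lo hi := by
  unfold any_blocked Clear
  rw [List.any_eq_false]
  constructor
  · intro h x h1 h2
    have := h x (by rw [PySem.List.mem_pyRange_one]; omega)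
    simpa using this
  · intro h x hx
    rw [PySem.List.mem_pyRange_one] at hx
    simpa using h x hx.1 hx.2

lemma path_iff (cs : List Char) (hp r : Int) (h0 : 0 ≤ hp) (h7 : hp < 7) (hr0 : 0 ≤ r)
    (hr3 : r ≤ 3) (hne : pyAt cs hp ≠ '.') :
    (walk_left cs r (walk_right cs r hp) = r + 1 ∨ walk_left cs r (walk_right cs r hp) = r + 2) ↔
      Clear cs (if hp ≤ r + 1 then hp + 1 else r + 2) (if hp ≤ r + 1 then r + 2 else hp) := by
  by_cases hcase : hp ≤ r + 1
  · rw [if_pos hcase, if_pos hcase]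
    unfold walk_right
    obtain ⟨hq1, hq2, hq3, hq4⟩ := walk_right_spec cs r (r + 2 - hp).toNat hp rfl (by omega)
    set q1 := walk_right_aux cs r (r + 2 - hp).toNat hp with hq1def
    by_cases hq1r : q1 ≤ r + 1
    · -- walk_left is a no-op
      have hwl : walk_left cs r q1 = q1 := by
        unfold walk_left
        have : (q1 - (r + 1)).toNat = 0 := by omega
        rw [this]
        rfl
      rw [hwl]
      constructor
      · intro hpc x hx1 hx2
        have hq1e : q1 = r + 1 := by omega
        exact hq3 x (by omega) (by omega)
      · intro hclear
        left
        by_contra hq1ne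
        have hlt : q1 < r + 1 := by omega
        rcases hq4 with h | h
        · omega
        · exact h (hclear (q1 + 1) (by omega) (by omega))
    · -- q1 = r + 2
      have hq1e : q1 = r + 2 := by omega
      obtain ⟨hw1, hw2, hw3, hw4⟩ := walk_left_spec cs r (q1 - (r + 1)).toNat q1 rfl (by omega)
      unfold walk_left
      constructor
      · intro _ x hx1 hx2
        exact hq3 x (by omega) (by omega)
      · intro _
        omega
  · rw [if_neg hcase, if_neg hcase]
    have hwr : walk_right cs r hp = hp := by
      unfold walk_right
      have : (r + 2 - hp).toNat = 0 := by omega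
      rw [this]
      rfl
    rw [hwr]
    obtain ⟨hw1, hw2, hw3, hw4⟩ := walk_left_spec cs r (hp - (r + 1)).toNat hp rfl (by omega)
    unfold walk_left
    set q2 := walk_left_aux cs r (hp - (r + 1)).toNat hp with hq2def
    constructor
    · intro hpc x hx1 hx2
      rcases hpc with h | h <;> exact hw3 x (by omega) hx2
    · intro hclear
      by_contra hq2ne
      push Not at hq2ne
      have hgt : r + 2 < q2 := by omega
      rcases hw4 with h | h
      · omega
      · exact h (hclear (q2 - 1) (by omega) (by omega))


-- ---- the applied move: B's state update equals single_move, and its effect ----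
lemma move_eq_single (cs : List Char) (hp j : Int) (c : Char) (hhp0 : 0 ≤ hp) (hhpj : hp ≤ j)
    (hc : pyAt cs hp = c) (hdot : pyAt cs j = '.') :
    single_move cs hp j =
      PySem.List.slice cs none (some hp) ++ ['.'] ++
        PySem.List.slice cs (some (hp + 1)) (some j) ++ [c] ++
        PySem.List.slice cs (some (j + 1)) none := by
  have h1 : single_move cs hp j =
      PySem.List.slice cs none (some (min hp j)) ++ [pyAt cs (max hp j)] ++
        PySem.List.slice cs (some (min hp j + 1)) (some (max hp j)) ++ [pyAt cs (min hp j)] ++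
        PySem.List.slice cs (some (max hp j + 1)) none := rfl
  rw [h1, min_eq_left hhpj, max_eq_right hhpj, hc, hdot]

lemma move_length (cs : List Char) (hp j : Int) (c : Char) (hhp0 : 0 ≤ hp) (hhp7 : hp < 7)
    (hj7 : hp < j) (hjl : j < (cs.length : Int)) :
    (PySem.List.slice cs none (some hp) ++ ['.'] ++
      PySem.List.slice cs (some (hp + 1)) (some j) ++ [c] ++
      PySem.List.slice cs (some (j + 1)) none).length = cs.length := by
  rw [PySem.List.slice_to cs (by omega), PySem.List.slice_toNat cs (by omega) (by omega),
      PySem.List.slice_from cs (by omega)]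
  simp only [List.length_append, List.length_take, List.length_drop, List.length_cons,
    List.length_nil]
  omega

lemma move_pyAt (cs : List Char) (hp j : Int) (c : Char) (hhp0 : 0 ≤ hp) (hhp7 : hp < 7)
    (hj7 : 7 ≤ j) (hjl : j < (cs.length : Int)) :
    ∀ i : Int, 0 ≤ i → i < 7 →
      pyAt (PySem.List.slice cs none (some hp) ++ ['.'] ++
        PySem.List.slice cs (some (hp + 1)) (some j) ++ [c] ++
        PySem.List.slice cs (some (j + 1)) none) i = if i = hp then '.' else pyAt cs i := by
  intro i h0 h7
  have hlen := move_length cs hp j c hhp0 hhp7 (by omega) hjl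
  rw [PySem.List.slice_to cs (by omega), PySem.List.slice_toNat cs (by omega) (by omega),
      PySem.List.slice_from cs (by omega)] at hlen ⊢
  have hlen1 : (List.take hp.toNat cs).length = hp.toNat := by
    rw [List.length_take]; omega
  have hlen2 : (List.take (j.toNat - (hp + 1).toNat) (List.drop (hp + 1).toNat cs)).length
      = j.toNat - hp.toNat - 1 := by
    simp only [List.length_take, List.length_drop]; omega
  unfold pyAt
  rw [PySem.List.pyGetD_eq_getElem _ _ h0 (by rw [hlen]; omega)]
  rcases lt_trichotomy i.toNat hp.toNat with hcmp | hcmp | hcmp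
  · rw [List.getElem_append_left (by simp only [List.length_append, hlen1, hlen2,
        List.length_cons, List.length_nil]; omega),
        List.getElem_append_left (by simp only [List.length_append, hlen1, hlen2,
        List.length_cons, List.length_nil]; omega),
        List.getElem_append_left (by simp only [List.length_append, hlen1,
        List.length_cons, List.length_nil]; omega),
        List.getElem_append_left (by rw [hlen1]; omega),
        List.getElem_take]
    rw [if_neg (by omega), PySem.List.pyGetD_eq_getElem _ _ h0 (by omega)]
  · rw [List.getElem_append_left (by simp only [List.length_append, hlen1, hlen2,
        List.length_cons, List.length_nil]; omega),
        List.getElem_append_left (by simp only [List.length_append, hlen1, hlen2,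
        List.length_cons, List.length_nil]; omega),
        List.getElem_append_left (by simp only [List.length_append, hlen1,
        List.length_cons, List.length_nil]; omega),
        List.getElem_append_right (by rw [hlen1]; omega)]
    rw [if_pos (by omega)]
    have : i.toNat - (List.take hp.toNat cs).length = 0 := by rw [hlen1]; omega
    simp
  · rw [List.getElem_append_left (by simp only [List.length_append, hlen1, hlen2,
        List.length_cons, List.length_nil]; omega),
        List.getElem_append_left (by simp only [List.length_append, hlen1, hlen2,
        List.length_cons, List.length_nil]; omega),
        List.getElem_append_right (by simp only [List.length_append, hlen1,
        List.length_cons, List.length_nil]; omega),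
        List.getElem_take, List.getElem_drop]
    rw [if_neg (by omega), PySem.List.pyGetD_eq_getElem _ _ h0 (by omega)]
    congr 1
    simp only [List.length_append, hlen1, List.length_cons, List.length_nil]
    omega

lemma move_pre (cs l' : List Char) (hp : Int) (hpre : PreI cs) (hlen : l'.length = cs.length)
    (hat : ∀ i : Int, 0 ≤ i → i < 7 → pyAt l' i = if i = hp then '.' else pyAt cs i) :
    PreI l' := by
  refine ⟨by rw [hlen]; exact hpre.1, fun i h1 h2 => ?_⟩
  rw [hat i h1 h2]
  split_ifs
  · simp
  · exact hpre.2 i h1 h2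

lemma move_mu (cs l' : List Char) (hp : Int) (hhp0 : 0 ≤ hp) (hhp7 : hp < 7)
    (hne : pyAt cs hp ≠ '.')
    (hat : ∀ i : Int, 0 ≤ i → i < 7 → pyAt l' i = if i = hp then '.' else pyAt cs i) :
    mu l' < mu cs := by
  unfold mu
  apply Finset.sum_lt_sum
  · intro i hi
    rw [Finset.mem_range] at hi
    rw [hat (i : Int) (by omega) (by omega)]
    rcases eq_or_ne ((i : Nat) : Int) hp with he | he
    · rw [if_pos he]
      simp
    · rw [if_neg he]
  · refine ⟨hp.toNat, Finset.mem_range.mpr (by omega), ?_⟩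
    have hcast : ((hp.toNat : Nat) : Int) = hp := by omega
    rw [hat (hp.toNat : Int) (by omega) (by omega), hcast, if_pos rfl, if_pos rfl, if_neg hne]
    omega

lemma mu_le (cs : List Char) : mu cs ≤ 7 := by
  unfold mu
  calc ∑ i ∈ Finset.range 7, (if pyAt cs (i : Int) = '.' then 0 else 1)
      ≤ ∑ _i ∈ Finset.range 7, 1 := Finset.sum_le_sum (by intro i _; split_ifs <;> omega)
    _ = 7 := by simp


-- ---- alignment of the two room checks (k ≥ 1) ----
lemma room_align (cs ROOM : List Char) (C : Char) (K R BASE : Int)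
    (hbase : BASE = 7 + K * R) (hroomdef : ROOM = PySem.List.slice cs (some BASE) (some (BASE + K)))
    (hK1 : 1 ≤ K) (hR0 : 0 ≤ R) (hlen : BASE + K ≤ (cs.length : Int)) (hCdot : C ≠ '.') :
    ((trailing_run ROOM K C 0 = K ∨
        pyAt ROOM (K - 1 - trailing_run ROOM K C 0) ≠ '.') ↔
      pyAt cs (BASE + room_scan cs BASE C (K - 1)) ≠ '.') ∧
    (0 ≤ room_scan cs BASE C (K - 1) ∧ room_scan cs BASE C (K - 1) ≤ K - 1) ∧
    (¬ (trailing_run ROOM K C 0 = K ∨ pyAt ROOM (K - 1 - trailing_run ROOM K C 0) ≠ '.') →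
      room_scan cs BASE C (K - 1) = K - 1 - trailing_run ROOM K C 0) := by
  have hb0 : 0 ≤ BASE := by rw [hbase]; positivity
  have hsl : ∀ i : Int, 0 ≤ i → i < K → pyAt ROOM i = pyAt cs (BASE + i) := by
    intro i hi1 hi2
    rw [hroomdef]
    exact slice_pyAt cs BASE K i hb0 hi1 hi2 hlen
  have hbr := loops_bridge cs ROOM BASE K C hsl (K - 1).toNat (K - 1) rfl (by omega) (by omega)
  have e1 : K - 1 - (K - 1) = 0 := by omega
  have e2 : (K - 1).toNat + 1 = (K - 0).toNat := by omega
  rw [e1, e2] at hbr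
  have e3 : trailing_run_aux ROOM K C (K - 0).toNat 0 = trailing_run ROOM K C 0 := rfl
  have e4 : room_scan_aux cs BASE C (K - 1).toNat (K - 1) = room_scan cs BASE C (K - 1) := rfl
  rw [e3, e4] at hbr
  rcases hbr with ⟨ht, hrs, hat⟩ | ⟨heq, h0, hle, hat⟩
  · refine ⟨?_, ⟨by omega, by omega⟩, ?_⟩
    · constructor
      · intro _
        rw [hrs]
        rw [show BASE + 0 = BASE from by omega] at hat
        rw [show BASE + (0:Int) = BASE from by omega]
        rw [hat]
        exact hCdot
      · intro _
        exact Or.inl ht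
    · intro hcon
      exact absurd (Or.inl ht) hcon
  · have htne : trailing_run ROOM K C 0 ≠ K := by
      intro hk
      rw [hk] at heq
      omega
    refine ⟨?_, ⟨h0, hle⟩, fun _ => heq.symm⟩
    constructor
    · intro h
      rcases h with h | h
      · exact absurd h htne
      · rw [hsl (K - 1 - trailing_run ROOM K C 0) (by omega) (by omega)] at h
        rw [← heq]
        exact h
    · intro h
      right
      rw [hsl (K - 1 - trailing_run ROOM K C 0) (by omega) (by omega), heq]
      exact h


-- ---- one hallway scan: A's fused loop against B's scan function ----
lemma round_lemma (cs : List Char) (cost : Int) (hpre : PreI cs) (hnm : kOf cs = 0 → NoMove cs) :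
    ∀ hps : List Int, (∀ x ∈ hps, 0 ≤ x ∧ x < 7) →
      (scanB (kOf cs) cs cost hps = none →
        ∀ FR : Nat, stepA (hps.length + FR) cs cost hps = (cs, cost)) ∧
      (∀ l' c', scanB (kOf cs) cs cost hps = some (l', c') →
        1 ≤ kOf cs ∧ l'.length = cs.length ∧ PreI l' ∧ mu l' < mu cs ∧
        ∀ FR : Nat, ∃ F', FR ≤ F' ∧
          stepA (hps.length + FR) cs cost hps = stepA F' l' c' (PySem.List.pyRange 0 7 1)) := by
  intro hps
  induction hps with
  | nil =>
    intro _
    constructor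
    · intro _ FR
      cases FR with
      | zero => rfl
      | succ n => rfl
    · intro l' c' h
      rw [show scanB (kOf cs) cs cost [] = none from rfl] at h
      cases h
  | cons hp rest ih =>
    intro hmem
    obtain ⟨hhp0, hhp7⟩ := hmem hp List.mem_cons_self
    have hmemr : ∀ x ∈ rest, 0 ≤ x ∧ x < 7 := fun x hx => hmem x (List.mem_cons_of_mem _ hx)
    obtain ⟨ihn, ihs⟩ := ih hmemr
    have hlen7 : 7 ≤ (cs.length : Int) := hpre.1
    obtain ⟨hk0, hk41, hk42⟩ := kOf_facts cs hlen7
    have hfuel : ∀ FR : Nat, (hp :: rest).length + FR = (rest.length + FR) + 1 := by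
      intro FR; simp [List.length_cons]; omega
    set C := pyAt cs hp with hCdef
    set K := PySem.Int.floordiv ((cs.length : Int) - 7) 4 with hKdef
    have hkK : kOf cs = K := rfl
    set R := homeroomsA C with hRdef
    set RS := room_scan cs (7 + K * R) C (K - 1) with hRSdef
    set RB : Int := (((PySem.List.index? ['A', 'B', 'C', 'D'] C).getD 0 : Nat) : Int) with hRBdef
    set ROOM := PySem.List.slice cs (some (7 + K * RB)) (some (7 + K * RB + K)) with hROOMdef
    set T := trailing_run ROOM K C 0 with hTdef
    set W := walk_left cs R (walk_right cs R hp) with hWdef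
    have hAeq : ∀ F : Nat, stepA (F + 1) cs cost (hp :: rest) =
        if C = '.' then stepA F cs cost rest
        else if pyAt cs (7 + K * R + RS) ≠ '.' then stepA F cs cost rest
        else if W = R + 1 ∨ W = R + 2 then
          stepA F (single_move cs hp (7 + K * R + RS))
            (cost + get_moves hp R RS * costsA C) (PySem.List.pyRange 0 7 1)
        else stepA F cs cost rest := fun F => rfl
    have hBeq : scanB (kOf cs) cs cost (hp :: rest) =
        if C = '.' then scanB K cs cost rest
        else if T = K ∨ pyAt ROOM (K - 1 - T) ≠ '.' then scanB K cs cost rest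
        else if any_blocked cs (if hp ≤ RB + 1 then hp + 1 else RB + 2)
            (if hp ≤ RB + 1 then RB + 2 else hp) = true then scanB K cs cost rest
        else some (PySem.List.slice cs none (some hp) ++ ['.'] ++
            PySem.List.slice cs (some (hp + 1)) (some (7 + K * RB + (K - 1 - T))) ++ [C] ++
            PySem.List.slice cs (some (7 + K * RB + (K - 1 - T) + 1)) none,
          cost + (|hp - RB| * 2 + 4 * (if RB ≥ hp then 1 else 0)
            - 2 * (if hp - RB ≥ 2 then 1 else 0) - (if hp = 0 ∨ hp = 6 then 1 else 0)
            + (K - 1 - T)) *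
            (if C = 'A' then 1 else if C = 'B' then 10 else if C = 'C' then 100 else 1000)) := rfl
    by_cases hdot : C = '.'
    · rw [if_pos hdot] at hBeq
      have hA : ∀ FR, stepA ((hp :: rest).length + FR) cs cost (hp :: rest)
          = stepA (rest.length + FR) cs cost rest := by
        intro FR; rw [hfuel FR, hAeq _, if_pos hdot]
      rw [hkK] at ihn ihs
      refine ⟨fun h FR => by rw [hA FR]; exact ihn (by rw [hBeq] at h; exact h) FR,
             fun l' c' h => ?_⟩
      obtain ⟨a1, a2, a3, a4, a5⟩ := ihs l' c' (by rw [hBeq] at h; exact h)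
      exact ⟨by rw [hkK]; exact a1, a2, a3, a4, fun FR => by
        rw [hA FR]; exact a5 FR⟩
    · -- an amphipod sits at hp
      have hCcases := char_cases cs hp hpre hhp0 (by omega) hdot
      have hRB_R : RB = R := (hr_facts C hCcases).1
      obtain ⟨-, hR0, hR3, -⟩ := hr_facts C hCcases
      rw [if_neg hdot] at hBeq
      rw [hRB_R] at hROOMdef hBeq
      by_cases hKz : K = 0
      · -- no rooms: B always continues, A's wrapped check reads cell 6
        have hT0 : T = 0 := by
          rw [hTdef, hROOMdef, hKz]
          rfl
        have hBcont : T = K ∨ pyAt ROOM (K - 1 - T) ≠ '.' := Or.inl (by rw [hT0, hKz])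
        rw [if_pos hBcont] at hBeq
        have hRSz : RS = -1 := by rw [hRSdef, hKz]; rfl
        have hJ6 : 7 + K * R + RS = 6 := by rw [hKz, hRSz]; ring
        have hA : ∀ FR, stepA ((hp :: rest).length + FR) cs cost (hp :: rest)
            = stepA (rest.length + FR) cs cost rest := by
          intro FR
          rw [hfuel FR, hAeq _, if_neg hdot]
          by_cases h6 : pyAt cs (7 + K * R + RS) ≠ '.'
          · rw [if_pos h6]
          · rw [if_neg h6]
            have h6' : pyAt cs 6 = '.' := by rw [← hJ6]; simpa using h6
            have hhp6 : hp < 6 := by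
              rcases lt_or_eq_of_le (show hp ≤ 6 from by omega) with h | h
              · exact h
              · exact absurd (by rw [← h] at h6'; exact h6') hdot
            have hnc := hnm (by rw [hkK]; exact hKz) h6' hp hhp0 hhp6 hdot
            rw [if_neg]
            intro hcon
            exact hnc ((path_iff cs hp R hhp0 hhp7 hR0 hR3 hdot).mp hcon)
        rw [hkK] at ihn ihs
        refine ⟨fun h FR => by rw [hA FR]; exact ihn (by rw [hBeq] at h; exact h) FR,
               fun l' c' h => ?_⟩
        obtain ⟨a1, a2, a3, a4, a5⟩ := ihs l' c' (by rw [hBeq] at h; exact h)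
        exact ⟨by rw [hkK]; exact a1, a2, a3, a4, fun FR => by rw [hA FR]; exact a5 FR⟩
      · -- k ≥ 1 : real rooms
        have hK1 : 1 ≤ K := by omega
        have hlenBK : 7 + K * R + K ≤ (cs.length : Int) := by nlinarith
        obtain ⟨hiff, ⟨hRS0, hRSle⟩, heqT⟩ := room_align cs ROOM C K R (7 + K * R) rfl
          hROOMdef hK1 hR0 hlenBK hdot
        by_cases hroom : T = K ∨ pyAt ROOM (K - 1 - T) ≠ '.'
        · -- room not ready: both continue
          rw [if_pos hroom] at hBeq
          have haroom : pyAt cs (7 + K * R + RS) ≠ '.' := hiff.mp hroom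
          have hA : ∀ FR, stepA ((hp :: rest).length + FR) cs cost (hp :: rest)
              = stepA (rest.length + FR) cs cost rest := by
            intro FR; rw [hfuel FR, hAeq _, if_neg hdot, if_pos haroom]
          rw [hkK] at ihn ihs
          refine ⟨fun h FR => by rw [hA FR]; exact ihn (by rw [hBeq] at h; exact h) FR,
                 fun l' c' h => ?_⟩
          obtain ⟨a1, a2, a3, a4, a5⟩ := ihs l' c' (by rw [hBeq] at h; exact h)
          exact ⟨by rw [hkK]; exact a1, a2, a3, a4, fun FR => by rw [hA FR]; exact a5 FR⟩
        · -- room ready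
          rw [if_neg hroom] at hBeq
          have hadot : pyAt cs (7 + K * R + RS) = '.' := by
            by_contra hcon
            exact hroom (hiff.mpr hcon)
          have hPRS : K - 1 - T = RS := (heqT hroom).symm
          rw [hPRS] at hBeq
          have hclear_iff := path_iff cs hp R hhp0 hhp7 hR0 hR3 hdot
          by_cases hblock : any_blocked cs (if hp ≤ R + 1 then hp + 1 else R + 2)
              (if hp ≤ R + 1 then R + 2 else hp) = true
          · -- path blocked: both continue
            rw [if_pos hblock] at hBeq
            have hnclear : ¬ Clear cs (if hp ≤ R + 1 then hp + 1 else R + 2)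
                (if hp ≤ R + 1 then R + 2 else hp) := by
              intro hcl
              rw [← anyb_iff] at hcl
              rw [hcl] at hblock
              cases hblock
            have hA : ∀ FR, stepA ((hp :: rest).length + FR) cs cost (hp :: rest)
                = stepA (rest.length + FR) cs cost rest := by
              intro FR
              rw [hfuel FR, hAeq _, if_neg hdot, if_neg (by simpa using hadot), if_neg]
              intro hcon
              exact hnclear (hclear_iff.mp hcon)
            rw [hkK] at ihn ihs
            refine ⟨fun h FR => by rw [hA FR]; exact ihn (by rw [hBeq] at h; exact h) FR,
                   fun l' c' h => ?_⟩
            obtain ⟨a1, a2, a3, a4, a5⟩ := ihs l' c' (by rw [hBeq] at h; exact h)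
            exact ⟨by rw [hkK]; exact a1, a2, a3, a4, fun FR => by rw [hA FR]; exact a5 FR⟩
          · -- MOVE
            rw [if_neg hblock] at hBeq
            have hclear : Clear cs (if hp ≤ R + 1 then hp + 1 else R + 2)
                (if hp ≤ R + 1 then R + 2 else hp) := by
              rw [← anyb_iff]
              exact Bool.not_eq_true _ ▸ (by simpa using hblock)
            have hwalk : W = R + 1 ∨ W = R + 2 := hclear_iff.mpr hclear
            have hJ7 : 7 ≤ 7 + K * R + RS := by
              have := mul_nonneg (show (0:Int) ≤ K by omega) (show (0:Int) ≤ R from hR0)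
              omega
            have hJlen : 7 + K * R + RS < (cs.length : Int) := by omega
            have hmove := move_eq_single cs hp (7 + K * R + RS) C hhp0 (by omega) rfl hadot
            have hlenL := move_length cs hp (7 + K * R + RS) C hhp0 hhp7 (by omega) hJlen
            have hatL := move_pyAt cs hp (7 + K * R + RS) C hhp0 hhp7 hJ7 hJlen
            have hcost : cost + (|hp - R| * 2 + 4 * (if R ≥ hp then 1 else 0)
                - 2 * (if hp - R ≥ 2 then 1 else 0) - (if hp = 0 ∨ hp = 6 then 1 else 0)
                + RS) * (if C = 'A' then 1 else if C = 'B' then 10 else if C = 'C' then 100 else 1000)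
                = cost + get_moves hp R RS * costsA C := rfl
            refine ⟨fun h => absurd (hBeq ▸ h) (Option.some_ne_none _), fun l' c' h => ?_⟩
            rw [hBeq] at h
            simp only [Option.some.injEq, Prod.mk.injEq] at h
            obtain ⟨hl', hc'⟩ := h
            refine ⟨by rw [hkK]; omega, by rw [← hl']; exact hlenL,
                    by rw [← hl']; exact move_pre cs _ hp hpre hlenL hatL,
                    by rw [← hl']; exact move_mu cs _ hp hhp0 hhp7 hdot hatL, ?_⟩
            intro FR
            refine ⟨rest.length + FR, by omega, ?_⟩
            rw [hfuel FR, hAeq _, if_neg hdot, if_neg (by simpa using hadot), if_pos hwalk]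
            rw [hmove, hl', ← hcost, hc']


-- ---- the full iteration ----
lemma main_lemma : ∀ (FB FA : Nat) (cs : List Char) (cost : Int), PreI cs →
    (kOf cs = 0 → NoMove cs) → mu cs < FB → 8 * FB ≤ FA →
    stepA FA cs cost (PySem.List.pyRange 0 7 1) = goB FB (kOf cs) cs cost := by
  intro FB
  induction FB with
  | zero => intro _ _ _ _ _ hmu _; omega
  | succ FB ih =>
    intro FA cs cost hpre hnm hmu hfa
    have hmem : ∀ x ∈ PySem.List.pyRange 0 7 1, 0 ≤ x ∧ x < 7 := by
      intro x hx
      rw [PySem.List.mem_pyRange_one] at hx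
      omega
    obtain ⟨rn, rs⟩ := round_lemma cs cost hpre hnm _ hmem
    have hlenR7 : (PySem.List.pyRange 0 7 1).length = 7 := rfl
    rw [hlenR7] at rn rs
    cases hsc : scanB (kOf cs) cs cost (PySem.List.pyRange 0 7 1) with
    | none =>
      have hB : goB (FB + 1) (kOf cs) cs cost = (cs, cost) := by
        simp only [goB, hsc]
      rw [hB]
      have := rn hsc (FA - 7)
      rw [show (7 : Nat) + (FA - 7) = FA from by omega] at this
      exact this
    | some pr =>
      obtain ⟨l', c'⟩ := pr
      have hB : goB (FB + 1) (kOf cs) cs cost = goB FB (kOf cs) l' c' := by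
        simp only [goB, hsc]
      rw [hB]
      obtain ⟨hK1, hlen, hpre', hmu', hstep⟩ := rs l' c' hsc
      obtain ⟨F', hF'le, hF'eq⟩ := hstep (FA - 7)
      rw [show (7 : Nat) + (FA - 7) = FA from by omega] at hF'eq
      have hkeq : kOf l' = kOf cs := by unfold kOf; rw [hlen]
      have happ := ih F' l' c' hpre' (fun h => absurd (hkeq ▸ h) (by omega))
        (by omega) (by omega)
      rw [hF'eq, happ, hkeq]


-- ---- tightness machinery: with zero-length rooms A moves an amphipod to cell 6, B does not ----
lemma move6_pyAt (cs : List Char) (hp : Int) (C : Char) (h0 : 0 ≤ hp) (h6 : hp < 6)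
    (hlen7 : 7 ≤ (cs.length : Int)) :
    ∀ i : Int, 0 ≤ i → i < 7 →
      pyAt (PySem.List.slice cs none (some hp) ++ ['.'] ++
        PySem.List.slice cs (some (hp + 1)) (some 6) ++ [C] ++
        PySem.List.slice cs (some (6 + 1)) none) i =
      if i = hp then '.' else if i = 6 then C else pyAt cs i := by
  intro i hi0 hi7
  have hlen := move_length cs hp 6 C h0 (by omega) (by omega) (by omega)
  rw [PySem.List.slice_to cs (by omega), PySem.List.slice_toNat cs (by omega) (by omega),
      PySem.List.slice_from cs (by omega)] at hlen ⊢
  have hlen1 : (List.take hp.toNat cs).length = hp.toNat := by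
    rw [List.length_take]; omega
  have hlen2 : (List.take ((6 : Int).toNat - (hp + 1).toNat) (List.drop (hp + 1).toNat cs)).length
      = 6 - hp.toNat - 1 := by
    simp only [List.length_take, List.length_drop]; omega
  unfold pyAt
  rw [PySem.List.pyGetD_eq_getElem _ _ hi0 (by rw [hlen]; omega)]
  rcases lt_trichotomy i.toNat hp.toNat with hcmp | hcmp | hcmp
  · rw [List.getElem_append_left (by simp only [List.length_append, hlen1, hlen2,
        List.length_cons, List.length_nil]; omega),
        List.getElem_append_left (by simp only [List.length_append, hlen1, hlen2,
        List.length_cons, List.length_nil]; omega),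
        List.getElem_append_left (by simp only [List.length_append, hlen1,
        List.length_cons, List.length_nil]; omega),
        List.getElem_append_left (by rw [hlen1]; omega),
        List.getElem_take]
    rw [if_neg (by omega), if_neg (by omega), PySem.List.pyGetD_eq_getElem _ _ hi0 (by omega)]
  · rw [List.getElem_append_left (by simp only [List.length_append, hlen1, hlen2,
        List.length_cons, List.length_nil]; omega),
        List.getElem_append_left (by simp only [List.length_append, hlen1, hlen2,
        List.length_cons, List.length_nil]; omega),
        List.getElem_append_left (by simp only [List.length_append, hlen1,
        List.length_cons, List.length_nil]; omega),
        List.getElem_append_right (by rw [hlen1]; omega)]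
    rw [if_pos (by omega)]
    have : i.toNat - (List.take hp.toNat cs).length = 0 := by rw [hlen1]; omega
    simp
  · by_cases hi6 : i.toNat = 6
    · rw [List.getElem_append_left (by simp only [List.length_append, hlen1, hlen2,
          List.length_cons, List.length_nil]; omega),
          List.getElem_append_right (by simp only [List.length_append, hlen1, hlen2,
          List.length_cons, List.length_nil]; omega)]
      rw [if_neg (by omega), if_pos (by omega)]
      have : i.toNat - (List.take hp.toNat cs ++ ['.'] ++
          List.take ((6 : Int).toNat - (hp + 1).toNat) (List.drop (hp + 1).toNat cs)).length = 0 := by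
        simp only [List.length_append, hlen1, hlen2, List.length_cons, List.length_nil]; omega
      simp [this]
    · -- hp < i < 6
      rw [List.getElem_append_left (by simp only [List.length_append, hlen1, hlen2,
          List.length_cons, List.length_nil]; omega),
          List.getElem_append_left (by simp only [List.length_append, hlen1, hlen2,
          List.length_cons, List.length_nil]; omega),
          List.getElem_append_right (by simp only [List.length_append, hlen1,
          List.length_cons, List.length_nil]; omega),
          List.getElem_take, List.getElem_drop]
      rw [if_neg (by omega), if_neg (by omega), PySem.List.pyGetD_eq_getElem _ _ hi0 (by omega)]
      congr 1
      simp only [List.length_append, hlen1, List.length_cons, List.length_nil]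
      omega

lemma scanB_k0 (cs : List Char) (cost : Int) :
    ∀ hps : List Int, scanB 0 cs cost hps = none := by
  intro hps
  induction hps with
  | nil => rfl
  | cons hp rest ih =>
    set RB : Int := (((PySem.List.index? ['A', 'B', 'C', 'D'] (pyAt cs hp)).getD 0 : Nat) : Int)
      with hRBdef
    set ROOM := PySem.List.slice cs (some (7 + 0 * RB)) (some (7 + 0 * RB + 0)) with hROOMdef
    have hT : trailing_run ROOM 0 (pyAt cs hp) 0 = 0 := rfl
    have he : scanB 0 cs cost (hp :: rest) =
        if pyAt cs hp = '.' then scanB 0 cs cost rest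
        else if trailing_run ROOM 0 (pyAt cs hp) 0 = 0 ∨
            pyAt ROOM (0 - 1 - trailing_run ROOM 0 (pyAt cs hp) 0) ≠ '.' then
          scanB 0 cs cost rest
        else some (PySem.List.slice cs none (some hp) ++ ['.'] ++
            PySem.List.slice cs (some (hp + 1))
              (some (7 + 0 * RB + (0 - 1 - trailing_run ROOM 0 (pyAt cs hp) 0))) ++ [pyAt cs hp] ++
            PySem.List.slice cs
              (some (7 + 0 * RB + (0 - 1 - trailing_run ROOM 0 (pyAt cs hp) 0) + 1)) none,
          cost + (|hp - RB| * 2 + 4 * (if RB ≥ hp then 1 else 0)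
            - 2 * (if hp - RB ≥ 2 then 1 else 0) - (if hp = 0 ∨ hp = 6 then 1 else 0)
            + (0 - 1 - trailing_run ROOM 0 (pyAt cs hp) 0)) *
            (if pyAt cs hp = 'A' then 1 else if pyAt cs hp = 'B' then 10
              else if pyAt cs hp = 'C' then 100 else 1000)) := rfl
    rw [he]
    by_cases hdot : pyAt cs hp = '.'
    · rw [if_pos hdot]
      exact ih
    · rw [if_neg hdot, if_pos (Or.inl hT)]
      exact ih

lemma goB_k0 (cs : List Char) (cost : Int) : ∀ f : Nat, goB f 0 cs cost = (cs, cost) := by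
  intro f
  cases f with
  | zero => rfl
  | succ n =>
    have he : goB (n + 1) 0 cs cost =
        match scanB 0 cs cost (PySem.List.pyRange 0 7 1) with
        | none => (cs, cost)
        | some (l', c') => goB n 0 l' c' := rfl
    rw [he, scanB_k0]

lemma k0_move_scan (cs : List Char) (cost : Int) (hpre : PreI cs)
    (hkz : PySem.Int.floordiv ((cs.length : Int) - 7) 4 = 0) (h6dot : pyAt cs 6 = '.') :
    ∀ hps : List Int, (∀ x ∈ hps, 0 ≤ x ∧ x < 7) →
      (∃ w ∈ hps, w < 6 ∧ pyAt cs w ≠ '.' ∧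
        Clear cs (if w ≤ homeroomsA (pyAt cs w) + 1 then w + 1 else homeroomsA (pyAt cs w) + 2)
                 (if w ≤ homeroomsA (pyAt cs w) + 1 then homeroomsA (pyAt cs w) + 2 else w)) →
      ∀ FR : Nat, ∃ (l' : List Char) (c' : Int) (F' : Nat), FR ≤ F' ∧
        stepA (hps.length + FR) cs cost hps = stepA F' l' c' (PySem.List.pyRange 0 7 1) ∧
        l'.length = cs.length ∧ PreI l' ∧ pyAt l' 6 ≠ '.' := by
  intro hps
  induction hps with
  | nil =>
    rintro _ ⟨w, hw, -⟩ _
    cases hw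
  | cons hp rest ih =>
    intro hmem hex FR
    obtain ⟨hhp0, hhp7⟩ := hmem hp List.mem_cons_self
    have hmemr : ∀ x ∈ rest, 0 ≤ x ∧ x < 7 := fun x hx => hmem x (List.mem_cons_of_mem _ hx)
    have hlen7 : 7 ≤ (cs.length : Int) := hpre.1
    have hfuel : (hp :: rest).length + FR = (rest.length + FR) + 1 := by
      simp [List.length_cons]; omega
    set C := pyAt cs hp with hCdef
    set K := PySem.Int.floordiv ((cs.length : Int) - 7) 4 with hKdef
    set R := homeroomsA C with hRdef
    set RS := room_scan cs (7 + K * R) C (K - 1) with hRSdef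
    set W := walk_left cs R (walk_right cs R hp) with hWdef
    have hAeq : ∀ F : Nat, stepA (F + 1) cs cost (hp :: rest) =
        if C = '.' then stepA F cs cost rest
        else if pyAt cs (7 + K * R + RS) ≠ '.' then stepA F cs cost rest
        else if W = R + 1 ∨ W = R + 2 then
          stepA F (single_move cs hp (7 + K * R + RS))
            (cost + get_moves hp R RS * costsA C) (PySem.List.pyRange 0 7 1)
        else stepA F cs cost rest := fun F => rfl
    have hRSz : RS = -1 := by rw [hRSdef, hkz]; rfl
    have hJ6 : 7 + K * R + RS = 6 := by rw [hkz, hRSz]; ring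
    by_cases hdot : C = '.'
    · -- continue; the witness is in rest
      obtain ⟨w, hwmem, hw6, hwne, hwcl⟩ := hex
      have hwr : w ∈ rest := by
        rcases List.mem_cons.mp hwmem with h | h
        · exfalso
          apply hwne
          rw [h, ← hCdef]
          exact hdot
        · exact h
      obtain ⟨l', c', F', hF', heq, hl, hpl, h6l⟩ := ih hmemr ⟨w, hwr, hw6, hwne, hwcl⟩ FR
      exact ⟨l', c', F', hF', by rw [hfuel, hAeq _, if_pos hdot]; exact heq, hl, hpl, h6l⟩
    · have hCcases := char_cases cs hp hpre hhp0 (by omega) hdot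
      obtain ⟨-, hR0, hR3, -⟩ := hr_facts C hCcases
      have h6ne : ¬ pyAt cs (7 + K * R + RS) ≠ '.' := by rw [hJ6]; simpa using h6dot
      by_cases hw : W = R + 1 ∨ W = R + 2
      · -- the move to cell 6 happens here
        have hhp6 : hp < 6 := by
          rcases lt_or_eq_of_le (show hp ≤ 6 from by omega) with h | h
          · exact h
          · exfalso
            apply hdot
            rw [hCdef, h]
            exact h6dot
        have hmv := move_eq_single cs hp 6 C hhp0 (by omega) rfl h6dot
        have hlenL := move_length cs hp 6 C hhp0 hhp7 (by omega) (by omega)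
        have hatL := move6_pyAt cs hp C hhp0 hhp6 hlen7
        refine ⟨_, cost + get_moves hp R RS * costsA C, rest.length + FR, by omega,
          by rw [hfuel, hAeq _, if_neg hdot, if_neg h6ne, if_pos hw, hJ6, hmv], hlenL, ?_, ?_⟩
        · refine ⟨by rw [hlenL]; exact hpre.1, fun i hi0 hi7 => ?_⟩
          rw [hatL i hi0 hi7]
          split_ifs
          · simp
          · rw [hCdef]
            rcases hCcases with h | h | h | h <;> simp [h]
          · exact hpre.2 i hi0 hi7
        · rw [hatL 6 (by norm_num) (by norm_num), if_neg (by omega), if_pos rfl]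
          rw [hCdef]
          rcases hCcases with h | h | h | h <;> rw [h] <;> simp
      · -- path blocked at hp; the witness must sit elsewhere
        obtain ⟨w, hwmem, hw6, hwne, hwcl⟩ := hex
        have hwr : w ∈ rest := by
          rcases List.mem_cons.mp hwmem with h | h
          · exfalso
            apply hw
            rw [hWdef]
            have hweq : w = hp := h
            rw [hweq, ← hCdef] at hwcl
            exact (path_iff cs hp R hhp0 hhp7 hR0 hR3 hdot).mpr
              (by rw [hRdef]; exact hwcl)
          · exact h
        obtain ⟨l', c', F', hF', heq, hl, hpl, h6l⟩ := ih hmemr ⟨w, hwr, hw6, hwne, hwcl⟩ FR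
        exact ⟨l', c', F', hF', by rw [hfuel, hAeq _, if_neg hdot, if_neg h6ne, if_neg hw]; exact heq,
          hl, hpl, h6l⟩

-- ---- bridges from Pre_ and ¬D_ to the internal forms ----
lemma pre_bridge (state : String) (cost : Int) (h : Pre_go_home state cost) :
    PreI state.toList := by
  obtain ⟨h1, h2⟩ := h
  refine ⟨by exact_mod_cast h1, fun i hi0 hi7 => ?_⟩
  rw [pyAt_eq_getD state.toList i hi0 (by omega)]
  exact h2 i.toNat (by omega)

lemma noD_bridge (state : String) (cost : Int) (hpre : Pre_go_home state cost)
    (hnd : ¬ D_go_home state cost) (hkz : kOf state.toList = 0) :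
    NoMove state.toList := by
  obtain ⟨hk0, hk41, hk42⟩ := kOf_facts state.toList (by exact_mod_cast hpre.1)
  intro h6 hp hp0 hp6 hpne hclear
  apply hnd
  have hpi := pre_bridge state cost hpre
  have hcc := char_cases state.toList hp hpi hp0 (by omega) hpne
  obtain ⟨-, hR0, hR3, hRI⟩ := hr_facts _ hcc
  have hgd : state.toList.getD hp.toNat ' ' = pyAt state.toList hp :=
    (pyAt_eq_getD state.toList hp hp0 (by omega)).symm
  refine ⟨hpre.1, by omega, ?_, hp.toNat, by omega, ?_, ?_, ?_⟩
  · rw [← pyAt_natCast state.toList 6 (by omega)]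
    exact h6
  · rw [hgd]
    rcases hcc with h | h | h | h <;> simp [h]
  · intro x hx1 hx2
    rw [hgd] at hx1
    by_cases hcase : hp ≤ homeroomsA (pyAt state.toList hp) + 1
    · have hcl := hclear (x : Int) (by rw [if_pos hcase]; omega)
        (by rw [if_pos hcase]; omega)
      rw [← pyAt_natCast state.toList x (by
        have hxlt : (x : Int) < homeroomsA (pyAt state.toList hp) + 2 := by omega
        omega)]
      simpa using hcl
    · exfalso
      omega
  · intro x hx1 hx2
    rw [hgd] at hx2
    by_cases hcase : hp ≤ homeroomsA (pyAt state.toList hp) + 1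
    · exfalso
      omega
    · have hcl := hclear (x : Int) (by rw [if_neg hcase]; omega)
        (by rw [if_neg hcase]; omega)
      rw [← pyAt_natCast state.toList x (by omega)]
      simpa using hcl

-- ===== VERDICT (by name: the statement is the Claim_ definition above) =====
theorem go_home_spec : Claim_unchanged_go_home := by
  unfold Claim_unchanged_go_home Spec_go_home
  intro state cost hdom hpre hnd
  have hmain := main_lemma 20 200 state.toList cost (pre_bridge state cost hpre)
    (fun hkz => noD_bridge state cost hpre hnd hkz)
    (by have := mu_le state.toList; omega) (by omega)
  unfold go_home go_home_alt
  rw [hmain]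
  rfl

theorem go_home_changed : Claim_changed_go_home := by
  unfold Claim_changed_go_home; decide

theorem go_home_tight : Claim_exact_go_home := by
  unfold Claim_exact_go_home
  intro state cost hdom hpre hd
  obtain ⟨hl7, hl10, h6g, w, hw6, hwmem, hall1, hall2⟩ := hd
  have hpi := pre_bridge state cost hpre
  obtain ⟨hk0, hk41, hk42⟩ := kOf_facts state.toList (by exact_mod_cast hl7)
  have hkz : kOf state.toList = 0 := by unfold kOf at *; omega
  have h6 : pyAt state.toList 6 = '.' := by
    rw [show (6 : Int) = ((6 : Nat) : Int) from rfl, pyAt_natCast state.toList 6 (by omega)]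
    exact h6g
  have hwg : pyAt state.toList (w : Int) = state.toList.getD w ' ' :=
    pyAt_natCast state.toList w (by omega)
  have hwne : pyAt state.toList (w : Int) ≠ '.' := by
    rw [hwg]
    simp only [List.mem_cons, List.not_mem_nil, or_false] at hwmem
    rcases hwmem with h | h | h | h <;> rw [h] <;> simp
  have hcc := char_cases state.toList (w : Int) hpi (by omega) (by omega) hwne
  obtain ⟨-, hR0, hR3, hRI⟩ := hr_facts _ hcc
  have hRg : homeroomsA (pyAt state.toList (w : Int))
      = ((roomIdxD (state.toList.getD w ' ') : Nat) : Int) := by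
    rw [← hwg]
    exact hRI.symm
  have hclear : Clear state.toList
      (if (w : Int) ≤ homeroomsA (pyAt state.toList (w : Int)) + 1 then (w : Int) + 1
        else homeroomsA (pyAt state.toList (w : Int)) + 2)
      (if (w : Int) ≤ homeroomsA (pyAt state.toList (w : Int)) + 1 then
        homeroomsA (pyAt state.toList (w : Int)) + 2 else (w : Int)) := by
    intro x hx1 hx2
    by_cases hcase : (w : Int) ≤ homeroomsA (pyAt state.toList (w : Int)) + 1
    · rw [if_pos hcase] at hx1 hx2
      have hx0 : 0 ≤ x := by omega
      rw [hRg] at hx2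
      have := hall1 x.toNat (by omega) (by omega)
      rw [pyAt_eq_getD state.toList x hx0 (by omega)]
      exact this
    · rw [if_neg hcase] at hx1 hx2
      have hx0 : 0 ≤ x := by omega
      rw [hRg] at hx1
      have := hall2 x.toNat (by omega) (by omega)
      rw [pyAt_eq_getD state.toList x hx0 (by omega)]
      exact this
  have hmemR7 : ∀ x ∈ PySem.List.pyRange 0 7 1, 0 ≤ x ∧ x < 7 := by
    intro x hx
    rw [PySem.List.mem_pyRange_one] at hx
    omega
  obtain ⟨l', c', F', hF', heq, hlen', hpre', h6'⟩ := k0_move_scan state.toList cost hpi hkz h6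
    (PySem.List.pyRange 0 7 1) hmemR7
    ⟨(w : Int), by rw [PySem.List.mem_pyRange_one]; omega, by omega, hwne, hclear⟩ 193
  have hnm' : kOf l' = 0 → NoMove l' := fun _ h => absurd h h6'
  obtain ⟨rn, -⟩ := round_lemma l' c' hpre' hnm' (PySem.List.pyRange 0 7 1) hmemR7
  have hkl' : kOf l' = 0 := by unfold kOf; rw [hlen']; exact hkz
  have hnone : scanB (kOf l') l' c' (PySem.List.pyRange 0 7 1) = none := by
    rw [hkl']
    exact scanB_k0 l' c' _
  have hfin := rn hnone (F' - 7)
  have hres : stepA 200 state.toList cost (PySem.List.pyRange 0 7 1) = (l', c') := by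
    rw [show (200 : Nat) = (PySem.List.pyRange 0 7 1).length + 193 from rfl, heq]
    rw [show F' = (PySem.List.pyRange 0 7 1).length + (F' - 7) from by
      rw [show (PySem.List.pyRange 0 7 1).length = 7 from rfl]; omega, hfin]
  have hBv : goB 20 (PySem.Int.floordiv ((state.toList.length : Int) - 7) 4) state.toList cost
      = (state.toList, cost) := by
    rw [show PySem.Int.floordiv ((state.toList.length : Int) - 7) 4 = 0 from hkz]
    exact goB_k0 state.toList cost 20
  unfold go_home go_home_alt
  rw [hres]
  show (String.ofList l', c') ≠
    (String.ofList (goB 20 (PySem.Int.floordiv ((state.toList.length : Int) - 7) 4)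
        state.toList cost).1,
      (goB 20 (PySem.Int.floordiv ((state.toList.length : Int) - 7) 4) state.toList cost).2)
  rw [hBv]
  intro hcon
  have h1 : String.ofList l' = String.ofList state.toList := congrArg Prod.fst hcon
  have h2 : l' = state.toList := by
    have := congrArg String.toList h1
    simpa [String.toList_ofList] using this
  rw [h2] at h6'
  exact h6' h6
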